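-- pv_equiv track=rewrite | github.com/Lewis0770/reorganization | mace/utils/property_extractor.py | _categorize_property
-- ===== SOURCE A (Python) =====
-- def _categorize_property(prop_name: str) -> str:
--     """Categorize a property based on its name."""
--     if any(x in prop_name.lower() for x in ['primitive_a', 'primitive_b', 'primitive_c', 'primitive_alpha', 'primitive_beta', 'primitive_gamma']):
--         return 'lattice'
--     elif any(x in prop_name.lower() for x in ['cell', 'volume', 'density', 'atomic', 'position']):
--         return 'structural'
--     elif any(x in prop_name.lower() for x in ['band_gap', 'energy', 'gap', 'electronic']):
--         return 'electronic'
--     elif any(x in prop_name.lower() for x in ['mulliken', 'overlap', 'charge', 'population']):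
--         return 'population_analysis'
--     elif any(x in prop_name.lower() for x in ['optimization', 'gradient', 'converged', 'cycles']):
--         return 'optimization'
--     elif any(x in prop_name.lower() for x in ['space_group', 'crystal_system', 'centering']):
--         return 'crystallographic'
--     elif any(x in prop_name.lower() for x in ['cpu_time', 'scf_cycles', 'memory', 'fermi_energy']):
--         return 'computational'
--     elif any(x in prop_name.lower() for x in ['band_', 'total_kpoints', 'total_bands', 'vbm_', 'cbm_', 'has_band_structure']):
--         return 'band_structure'
--     elif any(x in prop_name.lower() for x in ['dos_', 'doss_', 'has_dos']):
--         return 'density_of_states'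
--     elif any(x in prop_name.lower() for x in ['electronic_classification', 'classification_', 'insulator_type', 'semiconductor_type', 'magnetic_', 'conductivity_type']):
--         return 'electronic_classification'
--     elif any(x in prop_name.lower() for x in ['freq', 'vibrational', 'thermodynamic', 'entropy', 'heat_capacity', 'zero_point', 'gibbs', 'thermal_energy', 'force_constant']):
--         return 'frequency'
--     else:
--         return 'other'
-- ===== SOURCE B (Python) =====
-- # Text-scan categorizer: instead of testing each category's keywords with `in`,
-- # scan the lowered name position by position, match keywords anchored at each
-- # position, and keep the hit with the smallest priority (= position in the
-- # flattened keyword table, which encodes A's branch order).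
-- _KEYWORDS = [
--     ('primitive_a', 'lattice'), ('primitive_b', 'lattice'), ('primitive_c', 'lattice'),
--     ('primitive_alpha', 'lattice'), ('primitive_beta', 'lattice'), ('primitive_gamma', 'lattice'),
--     ('cell', 'structural'), ('volume', 'structural'), ('density', 'structural'),
--     ('atomic', 'structural'), ('position', 'structural'),
--     ('band_gap', 'electronic'), ('energy', 'electronic'), ('gap', 'electronic'), ('electronic', 'electronic'),
--     ('mulliken', 'population_analysis'), ('overlap', 'population_analysis'),
--     ('charge', 'population_analysis'), ('population', 'population_analysis'),
--     ('optimization', 'optimization'), ('gradient', 'optimization'),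
--     ('converged', 'optimization'), ('cycles', 'optimization'),
--     ('space_group', 'crystallographic'), ('crystal_system', 'crystallographic'), ('centering', 'crystallographic'),
--     ('cpu_time', 'computational'), ('scf_cycles', 'computational'),
--     ('memory', 'computational'), ('fermi_energy', 'computational'),
--     ('band_', 'band_structure'), ('total_kpoints', 'band_structure'), ('total_bands', 'band_structure'),
--     ('vbm_', 'band_structure'), ('cbm_', 'band_structure'), ('has_band_structure', 'band_structure'),
--     ('dos_', 'density_of_states'), ('doss_', 'density_of_states'), ('has_dos', 'density_of_states'),
--     ('electronic_classification', 'electronic_classification'), ('classification_', 'electronic_classification'),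
--     ('insulator_type', 'electronic_classification'), ('semiconductor_type', 'electronic_classification'),
--     ('magnetic_', 'electronic_classification'), ('conductivity_type', 'electronic_classification'),
--     ('freq', 'frequency'), ('vibrational', 'frequency'), ('thermodynamic', 'frequency'),
--     ('entropy', 'frequency'), ('heat_capacity', 'frequency'), ('zero_point', 'frequency'),
--     ('gibbs', 'frequency'), ('thermal_energy', 'frequency'), ('force_constant', 'frequency'),
-- ]
--
--
-- # index: first character -> the (priority, keyword, category) triples starting with it
-- _BY_FIRST = {}
-- for _prio, (_kw, _cat) in enumerate(_KEYWORDS):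
--     _BY_FIRST.setdefault(_kw[0], []).append((_prio, _kw, _cat))
--
--
-- def _categorize_property(prop_name: str) -> str:
--     name = prop_name.lower()
--     best = len(_KEYWORDS)
--     for i in range(len(name)):
--         for prio, kw, _cat in _BY_FIRST.get(name[i], ()):
--             if prio < best and name.startswith(kw, i):
--                 best = prio
--     return _KEYWORDS[best][1] if best < len(_KEYWORDS) else 'other'
-- ===== Notes on version B (the rewrite author's own statement) =====
-- stated objective: alternative
-- what changed: Replaces A's per-category substring-membership chain by a multi-pattern text scan: the lowered name is traversed position by position, keywords from a first-character bucket index over a flattened priority-ordered table are matched anchored at that position (startswith), and the minimum-priority hit's category is returned ('other' if none).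
import Mathlib
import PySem

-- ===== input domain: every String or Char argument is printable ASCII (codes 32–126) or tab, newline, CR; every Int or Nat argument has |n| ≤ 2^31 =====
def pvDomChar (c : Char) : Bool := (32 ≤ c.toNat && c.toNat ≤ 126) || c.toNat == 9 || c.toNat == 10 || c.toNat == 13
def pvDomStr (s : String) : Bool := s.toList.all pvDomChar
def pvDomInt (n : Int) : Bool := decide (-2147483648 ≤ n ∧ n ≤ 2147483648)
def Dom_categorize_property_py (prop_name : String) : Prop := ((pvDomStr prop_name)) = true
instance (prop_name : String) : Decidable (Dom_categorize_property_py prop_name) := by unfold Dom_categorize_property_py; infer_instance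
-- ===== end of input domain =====

-- B is an alternative algorithm of similar cost: a multi-pattern text scan over the lowered name (anchored startswith per position, minimum-priority hit) replacing A's per-category substring-membership chain.


-- ===== PORT A =====
def categorize_property_py (prop_name : String) : String :=
  if ["primitive_a", "primitive_b", "primitive_c", "primitive_alpha", "primitive_beta", "primitive_gamma"].any (fun x => PySem.Str.isIn x (PySem.Str.lower prop_name)) then "lattice"
  else if ["cell", "volume", "density", "atomic", "position"].any (fun x => PySem.Str.isIn x (PySem.Str.lower prop_name)) then "structural"
  else if ["band_gap", "energy", "gap", "electronic"].any (fun x => PySem.Str.isIn x (PySem.Str.lower prop_name)) then "electronic"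
  else if ["mulliken", "overlap", "charge", "population"].any (fun x => PySem.Str.isIn x (PySem.Str.lower prop_name)) then "population_analysis"
  else if ["optimization", "gradient", "converged", "cycles"].any (fun x => PySem.Str.isIn x (PySem.Str.lower prop_name)) then "optimization"
  else if ["space_group", "crystal_system", "centering"].any (fun x => PySem.Str.isIn x (PySem.Str.lower prop_name)) then "crystallographic"
  else if ["cpu_time", "scf_cycles", "memory", "fermi_energy"].any (fun x => PySem.Str.isIn x (PySem.Str.lower prop_name)) then "computational"
  else if ["band_", "total_kpoints", "total_bands", "vbm_", "cbm_", "has_band_structure"].any (fun x => PySem.Str.isIn x (PySem.Str.lower prop_name)) then "band_structure"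
  else if ["dos_", "doss_", "has_dos"].any (fun x => PySem.Str.isIn x (PySem.Str.lower prop_name)) then "density_of_states"
  else if ["electronic_classification", "classification_", "insulator_type", "semiconductor_type", "magnetic_", "conductivity_type"].any (fun x => PySem.Str.isIn x (PySem.Str.lower prop_name)) then "electronic_classification"
  else if ["freq", "vibrational", "thermodynamic", "entropy", "heat_capacity", "zero_point", "gibbs", "thermal_energy", "force_constant"].any (fun x => PySem.Str.isIn x (PySem.Str.lower prop_name)) then "frequency"
  else "other"

-- ===== PORT B =====
-- flattened priority-ordered keyword table (position in the list = priority)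
def pvKeywords : List (String × String) :=
  [("primitive_a", "lattice"),
   ("primitive_b", "lattice"),
   ("primitive_c", "lattice"),
   ("primitive_alpha", "lattice"),
   ("primitive_beta", "lattice"),
   ("primitive_gamma", "lattice"),
   ("cell", "structural"),
   ("volume", "structural"),
   ("density", "structural"),
   ("atomic", "structural"),
   ("position", "structural"),
   ("band_gap", "electronic"),
   ("energy", "electronic"),
   ("gap", "electronic"),
   ("electronic", "electronic"),
   ("mulliken", "population_analysis"),
   ("overlap", "population_analysis"),
   ("charge", "population_analysis"),
   ("population", "population_analysis"),
   ("optimization", "optimization"),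
   ("gradient", "optimization"),
   ("converged", "optimization"),
   ("cycles", "optimization"),
   ("space_group", "crystallographic"),
   ("crystal_system", "crystallographic"),
   ("centering", "crystallographic"),
   ("cpu_time", "computational"),
   ("scf_cycles", "computational"),
   ("memory", "computational"),
   ("fermi_energy", "computational"),
   ("band_", "band_structure"),
   ("total_kpoints", "band_structure"),
   ("total_bands", "band_structure"),
   ("vbm_", "band_structure"),
   ("cbm_", "band_structure"),
   ("has_band_structure", "band_structure"),
   ("dos_", "density_of_states"),
   ("doss_", "density_of_states"),
   ("has_dos", "density_of_states"),
   ("electronic_classification", "electronic_classification"),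
   ("classification_", "electronic_classification"),
   ("insulator_type", "electronic_classification"),
   ("semiconductor_type", "electronic_classification"),
   ("magnetic_", "electronic_classification"),
   ("conductivity_type", "electronic_classification"),
   ("freq", "frequency"),
   ("vibrational", "frequency"),
   ("thermodynamic", "frequency"),
   ("entropy", "frequency"),
   ("heat_capacity", "frequency"),
   ("zero_point", "frequency"),
   ("gibbs", "frequency"),
   ("thermal_energy", "frequency"),
   ("force_constant", "frequency")]

-- _BY_FIRST: first character -> triples starting with it (kw[0] ported as toList.headI: exact, every keyword is nonempty)
def pvByFirst : PySem.Dict Char (List (Int × String × String)) :=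
  (PySem.List.enumerate pvKeywords).foldl
    (fun d t => d.modify t.2.1.toList.headI [] (· ++ [t])) PySem.Dict.empty

def categorize_property_py_alt (prop_name : String) : String :=
  let name := PySem.Str.lower prop_name
  let best :=
    (PySem.List.pyRange 0 (PySem.Str.len name) 1).foldl
      (fun best i =>
        -- _BY_FIRST.get(name[i], ()): the none arm is unreachable, i is in range(len(name))
        let bucket := match PySem.Str.pyGet? name i with
          | some c => pvByFirst.getD c []
          | none => []
        -- name.startswith(kw, i) ported as s[i:].startswith(kw): exact for 0 ≤ i
        bucket.foldl
          (fun best t =>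
            if t.1 < best && PySem.Str.startswith (PySem.Str.slice name (some i) none) t.2.1 then t.1
            else best) best)
      (pvKeywords.length : Int)
  -- 'best < len(_KEYWORDS)' guards the index, so the pyGetD default is never used
  if best < (pvKeywords.length : Int) then (PySem.List.pyGetD pvKeywords best ("", "")).2 else "other"

-- ===== PRECONDITION & SPEC =====
def Spec_categorize_property_py (prop_name : String) (out : String) : Prop := out = categorize_property_py_alt prop_name
instance (prop_name : String) (out : String) : Decidable (Spec_categorize_property_py prop_name out) := by unfold Spec_categorize_property_py; infer_instance

-- ===== CLAIM (what is proved, stated in full; the proofs are below) =====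
def Claim_equal_categorize_property_py : Prop := ∀ (prop_name : String), Dom_categorize_property_py prop_name → Spec_categorize_property_py prop_name (categorize_property_py prop_name)

-- ===== LEMMAS AND PROOFS =====

def pvE1 : List (Int × String × String) :=
  [((0 : Int), "primitive_a", "lattice"),
   ((1 : Int), "primitive_b", "lattice"),
   ((2 : Int), "primitive_c", "lattice"),
   ((3 : Int), "primitive_alpha", "lattice"),
   ((4 : Int), "primitive_beta", "lattice"),
   ((5 : Int), "primitive_gamma", "lattice")]

def pvE2 : List (Int × String × String) :=
  [((6 : Int), "cell", "structural"),
   ((7 : Int), "volume", "structural"),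
   ((8 : Int), "density", "structural"),
   ((9 : Int), "atomic", "structural"),
   ((10 : Int), "position", "structural")]

def pvE3 : List (Int × String × String) :=
  [((11 : Int), "band_gap", "electronic"),
   ((12 : Int), "energy", "electronic"),
   ((13 : Int), "gap", "electronic"),
   ((14 : Int), "electronic", "electronic")]

def pvE4 : List (Int × String × String) :=
  [((15 : Int), "mulliken", "population_analysis"),
   ((16 : Int), "overlap", "population_analysis"),
   ((17 : Int), "charge", "population_analysis"),
   ((18 : Int), "population", "population_analysis")]

def pvE5 : List (Int × String × String) :=
  [((19 : Int), "optimization", "optimization"),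
   ((20 : Int), "gradient", "optimization"),
   ((21 : Int), "converged", "optimization"),
   ((22 : Int), "cycles", "optimization")]

def pvE6 : List (Int × String × String) :=
  [((23 : Int), "space_group", "crystallographic"),
   ((24 : Int), "crystal_system", "crystallographic"),
   ((25 : Int), "centering", "crystallographic")]

def pvE7 : List (Int × String × String) :=
  [((26 : Int), "cpu_time", "computational"),
   ((27 : Int), "scf_cycles", "computational"),
   ((28 : Int), "memory", "computational"),
   ((29 : Int), "fermi_energy", "computational")]

def pvE8 : List (Int × String × String) :=
  [((30 : Int), "band_", "band_structure"),
   ((31 : Int), "total_kpoints", "band_structure"),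
   ((32 : Int), "total_bands", "band_structure"),
   ((33 : Int), "vbm_", "band_structure"),
   ((34 : Int), "cbm_", "band_structure"),
   ((35 : Int), "has_band_structure", "band_structure")]

def pvE9 : List (Int × String × String) :=
  [((36 : Int), "dos_", "density_of_states"),
   ((37 : Int), "doss_", "density_of_states"),
   ((38 : Int), "has_dos", "density_of_states")]

def pvE10 : List (Int × String × String) :=
  [((39 : Int), "electronic_classification", "electronic_classification"),
   ((40 : Int), "classification_", "electronic_classification"),
   ((41 : Int), "insulator_type", "electronic_classification"),
   ((42 : Int), "semiconductor_type", "electronic_classification"),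
   ((43 : Int), "magnetic_", "electronic_classification"),
   ((44 : Int), "conductivity_type", "electronic_classification")]

def pvE11 : List (Int × String × String) :=
  [((45 : Int), "freq", "frequency"),
   ((46 : Int), "vibrational", "frequency"),
   ((47 : Int), "thermodynamic", "frequency"),
   ((48 : Int), "entropy", "frequency"),
   ((49 : Int), "heat_capacity", "frequency"),
   ((50 : Int), "zero_point", "frequency"),
   ((51 : Int), "gibbs", "frequency"),
   ((52 : Int), "thermal_energy", "frequency"),
   ((53 : Int), "force_constant", "frequency")]

-- the enumerate of the keyword table, as the concatenation of its 11 category blocks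
def pvE : List (Int × String × String) :=
  pvE1 ++ pvE2 ++ pvE3 ++ pvE4 ++ pvE5 ++ pvE6 ++ pvE7 ++ pvE8 ++ pvE9 ++ pvE10 ++ pvE11

theorem pvE_eq : PySem.List.enumerate pvKeywords = pvE := by decide

-- the inner fold over a table with strictly increasing priorities computes min of the start value and the first match's priority
theorem pv_inner_fold (q : String → Bool) (L : List (Int × String × String)) (b : Int)
    (hmono : List.Pairwise (fun s t => s.1 < t.1) L) :
    L.foldl (fun b t => if t.1 < b && q t.2.1 then t.1 else b) b
      = (match L.find? (fun t => q t.2.1) with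
         | some t => min b t.1
         | none => b) := by
  induction L generalizing b with
  | nil => rfl
  | cons t L ih =>
    rcases List.pairwise_cons.mp hmono with ⟨hlt, hmono'⟩
    simp only [List.foldl_cons, List.find?_cons]
    by_cases hq : q t.2.1 = true
    · have hstep : (if t.1 < b && q t.2.1 then t.1 else b) = min b t.1 := by
        simp only [hq, Bool.and_true]
        rcases lt_or_ge t.1 b with h | h
        · rw [if_pos (by simpa using h), min_eq_right (le_of_lt h)]
        · rw [if_neg (by simpa using not_lt.mpr h), min_eq_left h]
      rw [hstep, ih _ hmono']
      simp only [hq]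
      cases hfind : L.find? (fun t => q t.2.1) with
      | none => simp
      | some s =>
        have hs : t.1 < s.1 := hlt s (List.mem_of_find?_eq_some hfind)
        exact min_eq_left (le_trans (min_le_right b t.1) (le_of_lt hs))
    · have hstep : (if t.1 < b && q t.2.1 then t.1 else b) = b := by
        simp [hq]
      rw [hstep, ih _ hmono']
      simp [hq]

-- find? over a strictly increasing table returns a minimal-priority match
theorem pv_find?_min (q : (Int × String × String) → Bool) (L : List (Int × String × String))
    (hmono : List.Pairwise (fun s t => s.1 < t.1) L) (t : Int × String × String)
    (ht : t ∈ L) (hq : q t = true) :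
    ∃ u, L.find? q = some u ∧ u.1 ≤ t.1 := by
  induction L with
  | nil => cases ht
  | cons a L ih =>
    rcases List.pairwise_cons.mp hmono with ⟨hlt, hmono'⟩
    by_cases ha : q a = true
    · refine ⟨a, by simp [List.find?_cons, ha], ?_⟩
      rcases List.mem_cons.mp ht with rfl | hmem
      · omega
      · exact le_of_lt (hlt t hmem)
    · rcases List.mem_cons.mp ht with rfl | hmem
      · exact absurd hq ha
      · rcases ih hmono' hmem with ⟨u, hu, hle⟩
        exact ⟨u, by simp [List.find?_cons, ha, hu], hle⟩

theorem pv_fold_min_le_init (g : Int → Int) (l : List Int) (b : Int) :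
    l.foldl (fun b i => min b (g i)) b ≤ b := by
  induction l generalizing b with
  | nil => simp
  | cons i l ih =>
    simp only [List.foldl_cons]
    exact le_trans (ih _) (min_le_left _ _)

theorem pv_fold_min_le_mem (g : Int → Int) (l : List Int) (b : Int) {i : Int} (hi : i ∈ l) :
    l.foldl (fun b i => min b (g i)) b ≤ g i := by
  induction l generalizing b with
  | nil => cases hi
  | cons j l ih =>
    simp only [List.foldl_cons]
    rcases List.mem_cons.mp hi with rfl | hmem
    · exact le_trans (pv_fold_min_le_init _ _ _) (min_le_right _ _)
    · exact ih _ hmem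

theorem pv_fold_min_attain (g : Int → Int) (l : List Int) (b : Int) :
    l.foldl (fun b i => min b (g i)) b = b ∨ ∃ i ∈ l, l.foldl (fun b i => min b (g i)) b = g i := by
  induction l generalizing b with
  | nil => left; rfl
  | cons j l ih =>
    simp only [List.foldl_cons]
    rcases ih (min b (g j)) with h | ⟨i, hi, h⟩
    · rcases lt_or_ge (g j) b with hlt | hle
      · right; exact ⟨j, List.mem_cons_self .., by rw [h, min_eq_right (le_of_lt hlt)]⟩
      · left; rw [h, min_eq_left hle]
    · right; exact ⟨i, List.mem_cons_of_mem _ hi, h⟩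

theorem pv_fold_step_eq (f : Int → Int → Int) (g : Int → Int) (K : Int) (l : List Int) (b : Int)
    (hb : b ≤ K) (hg : ∀ i, g i ≤ K) (hf : ∀ b i, i ∈ l → b ≤ K → f b i = min b (g i)) :
    l.foldl f b = l.foldl (fun b i => min b (g i)) b := by
  induction l generalizing b with
  | nil => rfl
  | cons i l ih =>
    simp only [List.foldl_cons]
    rw [hf b i (List.mem_cons_self ..) hb]
    exact ih _ (le_trans (min_le_left _ _) hb) (fun b j hj hb => hf b j (List.mem_cons_of_mem _ hj) hb)

theorem pv_prefix_drop_lt (sub s : List Char) (j : Nat) (hne : sub ≠ [])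
    (h : sub <+: s.drop j) : j < s.length := by
  by_contra hge
  push_neg at hge
  rw [List.drop_eq_nil_of_le hge] at h
  exact hne (List.prefix_nil.mp h)

-- a setdefault/append grouping loop, read back: the bucket of c collects, in order, the entries keyed to c
theorem pv_getD_foldl_modify_key (key : Int × String × String → Char)
    (l : List (Int × String × String)) (d : PySem.Dict Char (List (Int × String × String))) (c : Char) :
    (l.foldl (fun d x => d.modify (key x) [] (· ++ [x])) d).getD c []
      = d.getD c [] ++ l.filter (fun x => key x == c) := by
  induction l generalizing d with
  | nil => simp
  | cons x l ih =>
    simp only [List.foldl_cons, List.filter_cons]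
    rw [ih]
    rw [PySem.Dict.getD_modify]
    by_cases hc : c = key x
    · rw [if_pos hc, if_pos (by simp [hc]), hc]
      simp
    · rw [if_neg hc, if_neg (by simpa using fun h => hc h.symm)]

-- each first-character bucket is the priority-ordered sublist of the table keyed to that character
theorem pv_getD_buckets (c : Char) :
    pvByFirst.getD c [] = pvE.filter (fun t => t.2.1.toList.headI == c) := by
  unfold pvByFirst
  rw [pvE_eq, pv_getD_foldl_modify_key]
  rfl

-- restricting to a superset of the matches does not change the first match
theorem pv_find?_filter (q r : (Int × String × String) → Bool) (L : List (Int × String × String))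
    (h : ∀ t ∈ L, q t = true → r t = true) :
    (L.filter r).find? q = L.find? q := by
  induction L with
  | nil => rfl
  | cons a L ih =>
    have ih' := ih (fun t ht => h t (List.mem_cons_of_mem _ ht))
    by_cases hq : q a = true
    · rw [List.filter_cons, if_pos (h a (List.mem_cons_self ..) hq)]
      simp [List.find?_cons, hq]
    · rw [List.filter_cons]
      by_cases hr : r a = true
      · rw [if_pos hr]
        simp only [List.find?_cons, Bool.not_eq_true] at hq ⊢
        rw [hq]
        exact ih'
      · rw [if_neg hr, ih']
        simp only [List.find?_cons, Bool.not_eq_true] at hq ⊢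
        rw [hq]

-- a nonempty prefix of a drop pins down the character at that position
theorem pv_prefix_headI (kw l : List Char) (n : Nat) (hne : kw ≠ [])
    (h : kw <+: l.drop n) : l[n]? = some kw.headI := by
  obtain ⟨c, tl, rfl⟩ := List.exists_cons_of_ne_nil hne
  obtain ⟨r, hr⟩ := h
  have hd : (l.drop n).head? = some c := by rw [← hr]; rfl
  rw [List.head?_drop] at hd
  simpa using hd

-- the best priority reachable from position i (the table's first anchored match there)
def pvG (nm : String) (K : Int) (i : Int) : Int :=
  match pvE.find? (fun t => PySem.Str.startswith (PySem.Str.slice nm (some i) none) t.2.1) with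
  | some t => t.1
  | none => K

-- B computes the category of the first keyword (in table order) occurring in the lowered name
set_option maxHeartbeats 1600000 in
theorem pv_alt_eq (p : String) :
    categorize_property_py_alt p
      = (match pvE.find? (fun t => PySem.Str.isIn t.2.1 (PySem.Str.lower p)) with
         | some t => t.2.2
         | none => "other") := by
  simp only [categorize_property_py_alt, pvE_eq]
  set nm := PySem.Str.lower p with hnm
  set K : Int := (pvKeywords.length : Int) with hK
  have hmono : List.Pairwise (fun s t => s.1 < t.1) pvE := by decide
  have hidx : ∀ t ∈ pvE, 0 ≤ t.1 ∧ t.1 < (pvKeywords.length : Int) ∧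
      PySem.List.pyGetD pvKeywords t.1 ("", "") = t.2 := by decide
  have hne : ∀ t ∈ pvE, t.2.1.toList ≠ [] := by decide
  -- the anchored-startswith predicate, as a prefix of a drop
  have hsw : ∀ (i : Int), 0 ≤ i → ∀ k : String,
      (PySem.Str.startswith (PySem.Str.slice nm (some i) none) k = true
        ↔ k.toList <+: nm.toList.drop i.toNat) := by
    intro i hi k
    rw [PySem.Str.startswith_eq, PySem.Str.toList_slice, PySem.Chars.slice_eq_listSlice,
      PySem.List.slice_from _ hi, PySem.Chars.startswith_iff]
  have hgle : ∀ i, pvG nm K i ≤ K := by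
    intro i
    simp only [pvG]
    cases hf : pvE.find? (fun t => PySem.Str.startswith (PySem.Str.slice nm (some i) none) t.2.1) with
    | some t => exact le_of_lt (hidx t (List.mem_of_find?_eq_some hf)).2.1
    | none => exact le_rfl
  have hstep : ∀ (b i : Int), i ∈ PySem.List.pyRange 0 (PySem.Str.len nm) 1 → b ≤ K →
      (match PySem.Str.pyGet? nm i with
        | some c => pvByFirst.getD c []
        | none => ([] : List (Int × String × String))).foldl
        (fun best (t : Int × String × String) =>
          if t.1 < best && PySem.Str.startswith (PySem.Str.slice nm (some i) none) t.2.1 then t.1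
          else best) b = min b (pvG nm K i) := by
    intro b i hi hb
    rcases (PySem.List.mem_pyRange_one).mp hi with ⟨hi0, hilt⟩
    rw [PySem.Str.len_eq] at hilt
    have hiN : i.toNat < nm.toList.length := by omega
    have hget : PySem.Str.pyGet? nm i = some (nm.toList[i.toNat]'hiN) := by
      have h1 : PySem.Str.pyGet? nm ((i.toNat : Nat) : Int) = nm.toList[i.toNat]? :=
        PySem.Str.pyGet?_natCast nm i.toNat
      rw [Int.toNat_of_nonneg hi0] at h1
      rw [h1]
      exact List.getElem?_eq_getElem hiN
    have hsup : ∀ t ∈ pvE,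
        PySem.Str.startswith (PySem.Str.slice nm (some i) none) t.2.1 = true →
        (t.2.1.toList.headI == nm.toList[i.toNat]'hiN) = true := by
      intro t ht hpred
      have hpre := (hsw i hi0 t.2.1).mp hpred
      have hh := pv_prefix_headI t.2.1.toList nm.toList i.toNat (hne t ht) hpre
      rw [List.getElem?_eq_getElem hiN] at hh
      simp only [Option.some_inj] at hh
      simp [hh]
    simp only [hget]
    rw [pv_getD_buckets]
    rw [pv_inner_fold (fun k => PySem.Str.startswith (PySem.Str.slice nm (some i) none) k) _ b
      (List.Pairwise.sublist List.filter_sublist hmono)]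
    rw [pv_find?_filter (fun t => PySem.Str.startswith (PySem.Str.slice nm (some i) none) t.2.1)
      (fun t => t.2.1.toList.headI == nm.toList[i.toNat]'hiN) pvE hsup]
    simp only [pvG]
    cases hf : pvE.find? (fun t => PySem.Str.startswith (PySem.Str.slice nm (some i) none) t.2.1) with
    | some t => rfl
    | none => exact (min_eq_left hb).symm
  rw [pv_fold_step_eq _ (pvG nm K) K _ K le_rfl hgle hstep]
  set best := (PySem.List.pyRange 0 (PySem.Str.len nm) 1).foldl (fun b i => min b (pvG nm K i)) K with hbest
  cases hglob : pvE.find? (fun t => PySem.Str.isIn t.2.1 nm) with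
  | none =>
    have hall := List.find?_eq_none.mp hglob
    have hgK : ∀ i ∈ PySem.List.pyRange 0 (PySem.Str.len nm) 1, pvG nm K i = K := by
      intro i hi
      have hi0 : 0 ≤ i := ((PySem.List.mem_pyRange_one).mp hi).1
      simp only [pvG]
      cases hf : pvE.find? (fun t => PySem.Str.startswith (PySem.Str.slice nm (some i) none) t.2.1) with
      | none => rfl
      | some t =>
        exfalso
        have ht := List.mem_of_find?_eq_some hf
        have hft : PySem.Str.startswith (PySem.Str.slice nm (some i) none) t.2.1 = true := by
          have := List.find?_some hf; simpa using this
        have hpre := (hsw i hi0 t.2.1).mp hft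
        have : PySem.Str.isIn t.2.1 nm = true := by
          rw [PySem.Str.isIn_eq]
          exact (PySem.Chars.exists_prefix_drop_iff_isIn t.2.1.toList nm.toList).mp ⟨i.toNat, hpre⟩
        exact (hall t ht) this
    have hbK : best = K := by
      rcases pv_fold_min_attain (pvG nm K) (PySem.List.pyRange 0 (PySem.Str.len nm) 1) K with h | ⟨i, hi, h⟩
      · exact h
      · rw [hbest, h, hgK i hi]
    rw [hbK, if_neg (lt_irrefl K)]
  | some u =>
    have hu : u ∈ pvE := List.mem_of_find?_eq_some hglob
    have hqu : PySem.Str.isIn u.2.1 nm = true := by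
      have := List.find?_some hglob; simpa using this
    -- best ≤ u.1 : the keyword of u occurs somewhere, so some position attains ≤ u.1
    have h1 : best ≤ u.1 := by
      have : ∃ j, u.2.1.toList <+: nm.toList.drop j :=
        (PySem.Chars.exists_prefix_drop_iff_isIn u.2.1.toList nm.toList).mpr
          (by rw [← PySem.Str.isIn_eq]; exact hqu)
      rcases this with ⟨j, hj⟩
      have hjlt : j < nm.toList.length := pv_prefix_drop_lt _ _ _ (hne u hu) hj
      have hjmem : (j : Int) ∈ PySem.List.pyRange 0 (PySem.Str.len nm) 1 := by
        rw [PySem.List.mem_pyRange_one, PySem.Str.len_eq]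
        constructor
        · exact Int.natCast_nonneg j
        · exact_mod_cast hjlt
      have hpredj : (fun t => PySem.Str.startswith (PySem.Str.slice nm (some (j : Int)) none) t.2.1) u = true := by
        refine (hsw (j : Int) (Int.natCast_nonneg j) u.2.1).mpr ?_
        simpa using hj
      rcases pv_find?_min (fun t => PySem.Str.startswith (PySem.Str.slice nm (some (j : Int)) none) t.2.1) pvE hmono u hu hpredj with ⟨w, hw, hwle⟩
      have hgj : pvG nm K (j : Int) ≤ u.1 := by simp only [pvG, hw]; exact hwle
      exact le_trans (pv_fold_min_le_mem (pvG nm K) _ K hjmem) hgj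
    -- u.1 ≤ best : every attained value is the priority of some matching keyword, and u is the first global match
    have h2 : u.1 ≤ best := by
      rcases pv_fold_min_attain (pvG nm K) (PySem.List.pyRange 0 (PySem.Str.len nm) 1) K with h | ⟨i, hi, h⟩
      · rw [hbest, h]; exact le_of_lt (hidx u hu).2.1
      · rw [hbest, h]
        simp only [pvG]
        have hi0 : 0 ≤ i := ((PySem.List.mem_pyRange_one).mp hi).1
        cases hf : pvE.find? (fun t => PySem.Str.startswith (PySem.Str.slice nm (some i) none) t.2.1) with
        | none => exact le_of_lt (hidx u hu).2.1
        | some t =>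
          have ht := List.mem_of_find?_eq_some hf
          have hft : PySem.Str.startswith (PySem.Str.slice nm (some i) none) t.2.1 = true := by
            have := List.find?_some hf; simpa using this
          have hpre := (hsw i hi0 t.2.1).mp hft
          have hqt : (fun t => PySem.Str.isIn t.2.1 nm) t = true := by
            simp only [PySem.Str.isIn_eq]
            exact (PySem.Chars.exists_prefix_drop_iff_isIn t.2.1.toList nm.toList).mp ⟨i.toNat, hpre⟩
          rcases pv_find?_min (fun t => PySem.Str.isIn t.2.1 nm) pvE hmono t ht hqt with ⟨w, hw, hwle⟩
          rw [hglob] at hw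
          cases hw
          exact hwle
    have hbu : best = u.1 := le_antisymm h1 h2
    rw [hbu, if_pos (hidx u hu).2.1, (hidx u hu).2.2]


-- a block with no match contributes a false condition on A's side
theorem pv_block_false (l : List (Int × String × String)) (nm : String)
    (h : l.find? (fun t => PySem.Str.isIn t.2.1 nm) = none) :
    ((l.map (fun t => t.2.1)).any (fun x => PySem.Str.isIn x nm)) = false := by
  rw [List.any_eq_false]
  intro x hx
  rcases List.mem_map.mp hx with ⟨t, ht, rfl⟩
  simpa using List.find?_eq_none.mp h t ht

-- ===== VERDICT (by name: the statement is the Claim_ definition above) =====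
set_option maxHeartbeats 1600000 in
theorem categorize_property_py_spec : Claim_equal_categorize_property_py := by
  intro p _
  unfold Spec_categorize_property_py
  rw [pv_alt_eq]
  unfold categorize_property_py pvE
  set nm := PySem.Str.lower p with hnm
  simp only [List.find?_append]
  cases h1 : pvE1.find? (fun t => PySem.Str.isIn t.2.1 nm) with
  | some t =>
    have hqt : PySem.Str.isIn t.2.1 nm = true := by have := List.find?_some h1; simpa using this
    have ht := List.mem_of_find?_eq_some h1
    simp only [pvE1, List.mem_cons, List.not_mem_nil, or_false] at ht
    have hct : (["primitive_a", "primitive_b", "primitive_c", "primitive_alpha", "primitive_beta", "primitive_gamma"].any (fun x => PySem.Str.isIn x nm)) = true := by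
      rcases ht with rfl | rfl | rfl | rfl | rfl | rfl <;> exact List.any_eq_true.mpr ⟨_, by simp, hqt⟩
    simp only [h1, Option.some_or, Option.none_or]
    rcases ht with rfl | rfl | rfl | rfl | rfl | rfl <;> simp only [hct] <;> rfl
  | none =>
    have hc1 : (["primitive_a", "primitive_b", "primitive_c", "primitive_alpha", "primitive_beta", "primitive_gamma"].any (fun x => PySem.Str.isIn x nm)) = false := pv_block_false pvE1 nm h1
    simp only [h1, Option.none_or, hc1, Bool.false_eq_true, if_false]
    cases h2 : pvE2.find? (fun t => PySem.Str.isIn t.2.1 nm) with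
    | some t =>
      have hqt : PySem.Str.isIn t.2.1 nm = true := by have := List.find?_some h2; simpa using this
      have ht := List.mem_of_find?_eq_some h2
      simp only [pvE2, List.mem_cons, List.not_mem_nil, or_false] at ht
      have hct : (["cell", "volume", "density", "atomic", "position"].any (fun x => PySem.Str.isIn x nm)) = true := by
        rcases ht with rfl | rfl | rfl | rfl | rfl <;> exact List.any_eq_true.mpr ⟨_, by simp, hqt⟩
      simp only [h2, Option.some_or, Option.none_or]
      rcases ht with rfl | rfl | rfl | rfl | rfl <;> simp only [hc1, hct] <;> rfl
    | none =>
      have hc2 : (["cell", "volume", "density", "atomic", "position"].any (fun x => PySem.Str.isIn x nm)) = false := pv_block_false pvE2 nm h2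
      simp only [h2, Option.none_or, hc2, Bool.false_eq_true, if_false]
      cases h3 : pvE3.find? (fun t => PySem.Str.isIn t.2.1 nm) with
      | some t =>
        have hqt : PySem.Str.isIn t.2.1 nm = true := by have := List.find?_some h3; simpa using this
        have ht := List.mem_of_find?_eq_some h3
        simp only [pvE3, List.mem_cons, List.not_mem_nil, or_false] at ht
        have hct : (["band_gap", "energy", "gap", "electronic"].any (fun x => PySem.Str.isIn x nm)) = true := by
          rcases ht with rfl | rfl | rfl | rfl <;> exact List.any_eq_true.mpr ⟨_, by simp, hqt⟩
        simp only [h3, Option.some_or, Option.none_or]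
        rcases ht with rfl | rfl | rfl | rfl <;> simp only [hc1, hc2, hct] <;> rfl
      | none =>
        have hc3 : (["band_gap", "energy", "gap", "electronic"].any (fun x => PySem.Str.isIn x nm)) = false := pv_block_false pvE3 nm h3
        simp only [h3, Option.none_or, hc3, Bool.false_eq_true, if_false]
        cases h4 : pvE4.find? (fun t => PySem.Str.isIn t.2.1 nm) with
        | some t =>
          have hqt : PySem.Str.isIn t.2.1 nm = true := by have := List.find?_some h4; simpa using this
          have ht := List.mem_of_find?_eq_some h4
          simp only [pvE4, List.mem_cons, List.not_mem_nil, or_false] at ht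
          have hct : (["mulliken", "overlap", "charge", "population"].any (fun x => PySem.Str.isIn x nm)) = true := by
            rcases ht with rfl | rfl | rfl | rfl <;> exact List.any_eq_true.mpr ⟨_, by simp, hqt⟩
          simp only [h4, Option.some_or, Option.none_or]
          rcases ht with rfl | rfl | rfl | rfl <;> simp only [hc1, hc2, hc3, hct] <;> rfl
        | none =>
          have hc4 : (["mulliken", "overlap", "charge", "population"].any (fun x => PySem.Str.isIn x nm)) = false := pv_block_false pvE4 nm h4
          simp only [h4, Option.none_or, hc4, Bool.false_eq_true, if_false]
          cases h5 : pvE5.find? (fun t => PySem.Str.isIn t.2.1 nm) with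
          | some t =>
            have hqt : PySem.Str.isIn t.2.1 nm = true := by have := List.find?_some h5; simpa using this
            have ht := List.mem_of_find?_eq_some h5
            simp only [pvE5, List.mem_cons, List.not_mem_nil, or_false] at ht
            have hct : (["optimization", "gradient", "converged", "cycles"].any (fun x => PySem.Str.isIn x nm)) = true := by
              rcases ht with rfl | rfl | rfl | rfl <;> exact List.any_eq_true.mpr ⟨_, by simp, hqt⟩
            simp only [h5, Option.some_or, Option.none_or]
            rcases ht with rfl | rfl | rfl | rfl <;> simp only [hc1, hc2, hc3, hc4, hct] <;> rfl
          | none =>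
            have hc5 : (["optimization", "gradient", "converged", "cycles"].any (fun x => PySem.Str.isIn x nm)) = false := pv_block_false pvE5 nm h5
            simp only [h5, Option.none_or, hc5, Bool.false_eq_true, if_false]
            cases h6 : pvE6.find? (fun t => PySem.Str.isIn t.2.1 nm) with
            | some t =>
              have hqt : PySem.Str.isIn t.2.1 nm = true := by have := List.find?_some h6; simpa using this
              have ht := List.mem_of_find?_eq_some h6
              simp only [pvE6, List.mem_cons, List.not_mem_nil, or_false] at ht
              have hct : (["space_group", "crystal_system", "centering"].any (fun x => PySem.Str.isIn x nm)) = true := by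
                rcases ht with rfl | rfl | rfl <;> exact List.any_eq_true.mpr ⟨_, by simp, hqt⟩
              simp only [h6, Option.some_or, Option.none_or]
              rcases ht with rfl | rfl | rfl <;> simp only [hc1, hc2, hc3, hc4, hc5, hct] <;> rfl
            | none =>
              have hc6 : (["space_group", "crystal_system", "centering"].any (fun x => PySem.Str.isIn x nm)) = false := pv_block_false pvE6 nm h6
              simp only [h6, Option.none_or, hc6, Bool.false_eq_true, if_false]
              cases h7 : pvE7.find? (fun t => PySem.Str.isIn t.2.1 nm) with
              | some t =>
                have hqt : PySem.Str.isIn t.2.1 nm = true := by have := List.find?_some h7; simpa using this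
                have ht := List.mem_of_find?_eq_some h7
                simp only [pvE7, List.mem_cons, List.not_mem_nil, or_false] at ht
                have hct : (["cpu_time", "scf_cycles", "memory", "fermi_energy"].any (fun x => PySem.Str.isIn x nm)) = true := by
                  rcases ht with rfl | rfl | rfl | rfl <;> exact List.any_eq_true.mpr ⟨_, by simp, hqt⟩
                simp only [h7, Option.some_or, Option.none_or]
                rcases ht with rfl | rfl | rfl | rfl <;> simp only [hc1, hc2, hc3, hc4, hc5, hc6, hct] <;> rfl
              | none =>
                have hc7 : (["cpu_time", "scf_cycles", "memory", "fermi_energy"].any (fun x => PySem.Str.isIn x nm)) = false := pv_block_false pvE7 nm h7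
                simp only [h7, Option.none_or, hc7, Bool.false_eq_true, if_false]
                cases h8 : pvE8.find? (fun t => PySem.Str.isIn t.2.1 nm) with
                | some t =>
                  have hqt : PySem.Str.isIn t.2.1 nm = true := by have := List.find?_some h8; simpa using this
                  have ht := List.mem_of_find?_eq_some h8
                  simp only [pvE8, List.mem_cons, List.not_mem_nil, or_false] at ht
                  have hct : (["band_", "total_kpoints", "total_bands", "vbm_", "cbm_", "has_band_structure"].any (fun x => PySem.Str.isIn x nm)) = true := by
                    rcases ht with rfl | rfl | rfl | rfl | rfl | rfl <;> exact List.any_eq_true.mpr ⟨_, by simp, hqt⟩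
                  simp only [h8, Option.some_or, Option.none_or]
                  rcases ht with rfl | rfl | rfl | rfl | rfl | rfl <;> simp only [hc1, hc2, hc3, hc4, hc5, hc6, hc7, hct] <;> rfl
                | none =>
                  have hc8 : (["band_", "total_kpoints", "total_bands", "vbm_", "cbm_", "has_band_structure"].any (fun x => PySem.Str.isIn x nm)) = false := pv_block_false pvE8 nm h8
                  simp only [h8, Option.none_or, hc8, Bool.false_eq_true, if_false]
                  cases h9 : pvE9.find? (fun t => PySem.Str.isIn t.2.1 nm) with
                  | some t =>
                    have hqt : PySem.Str.isIn t.2.1 nm = true := by have := List.find?_some h9; simpa using this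
                    have ht := List.mem_of_find?_eq_some h9
                    simp only [pvE9, List.mem_cons, List.not_mem_nil, or_false] at ht
                    have hct : (["dos_", "doss_", "has_dos"].any (fun x => PySem.Str.isIn x nm)) = true := by
                      rcases ht with rfl | rfl | rfl <;> exact List.any_eq_true.mpr ⟨_, by simp, hqt⟩
                    simp only [h9, Option.some_or, Option.none_or]
                    rcases ht with rfl | rfl | rfl <;> simp only [hc1, hc2, hc3, hc4, hc5, hc6, hc7, hc8, hct] <;> rfl
                  | none =>
                    have hc9 : (["dos_", "doss_", "has_dos"].any (fun x => PySem.Str.isIn x nm)) = false := pv_block_false pvE9 nm h9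
                    simp only [h9, Option.none_or, hc9, Bool.false_eq_true, if_false]
                    cases h10 : pvE10.find? (fun t => PySem.Str.isIn t.2.1 nm) with
                    | some t =>
                      have hqt : PySem.Str.isIn t.2.1 nm = true := by have := List.find?_some h10; simpa using this
                      have ht := List.mem_of_find?_eq_some h10
                      simp only [pvE10, List.mem_cons, List.not_mem_nil, or_false] at ht
                      have hct : (["electronic_classification", "classification_", "insulator_type", "semiconductor_type", "magnetic_", "conductivity_type"].any (fun x => PySem.Str.isIn x nm)) = true := by
                        rcases ht with rfl | rfl | rfl | rfl | rfl | rfl <;> exact List.any_eq_true.mpr ⟨_, by simp, hqt⟩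
                      simp only [h10, Option.some_or, Option.none_or]
                      rcases ht with rfl | rfl | rfl | rfl | rfl | rfl <;> simp only [hc1, hc2, hc3, hc4, hc5, hc6, hc7, hc8, hc9, hct] <;> rfl
                    | none =>
                      have hc10 : (["electronic_classification", "classification_", "insulator_type", "semiconductor_type", "magnetic_", "conductivity_type"].any (fun x => PySem.Str.isIn x nm)) = false := pv_block_false pvE10 nm h10
                      simp only [h10, Option.none_or, hc10, Bool.false_eq_true, if_false]
                      cases h11 : pvE11.find? (fun t => PySem.Str.isIn t.2.1 nm) with
                      | some t =>
                        have hqt : PySem.Str.isIn t.2.1 nm = true := by have := List.find?_some h11; simpa using this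
                        have ht := List.mem_of_find?_eq_some h11
                        simp only [pvE11, List.mem_cons, List.not_mem_nil, or_false] at ht
                        have hct : (["freq", "vibrational", "thermodynamic", "entropy", "heat_capacity", "zero_point", "gibbs", "thermal_energy", "force_constant"].any (fun x => PySem.Str.isIn x nm)) = true := by
                          rcases ht with rfl | rfl | rfl | rfl | rfl | rfl | rfl | rfl | rfl <;> exact List.any_eq_true.mpr ⟨_, by simp, hqt⟩
                        simp only [h11, Option.some_or, Option.none_or]
                        rcases ht with rfl | rfl | rfl | rfl | rfl | rfl | rfl | rfl | rfl <;> simp only [hc1, hc2, hc3, hc4, hc5, hc6, hc7, hc8, hc9, hc10, hct] <;> rfl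
                      | none =>
                        have hc11 : (["freq", "vibrational", "thermodynamic", "entropy", "heat_capacity", "zero_point", "gibbs", "thermal_energy", "force_constant"].any (fun x => PySem.Str.isIn x nm)) = false := pv_block_false pvE11 nm h11
                        simp only [h11, Option.none_or, hc11, Bool.false_eq_true, if_false]
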